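-- pv_equiv track=rewrite | github.com/dalestee/PYRISK | PYRISK/Module_fonctions.py | bonus_continent
-- ===== SOURCE A (Python) =====
-- def bonus_continent(Joueur):
--     """
--         Fonction qui prend un joueur(Tableau) comme argument et qui renvoy quel est son bonus continent
--     """
--     bonus = 0
--     AmeriqueN = [0,1,2,3,4,5,6,7,8]
--     AmeriqueS = [9,10,11,12]
--     Afrique   = [13,14,15,16,17,18]
--     Europe    = [19,21,22,23,24,25,28]
--     Asie      = [20,26,27,29,30,31,32,33,34,37,38,41]
--     Oceanie   = [35,36,39,40]
--     var = 0
--     for i in range(len(AmeriqueS)):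
--         if AmeriqueS[i] in Joueur:
--             var += 1
--     if var == len(AmeriqueS):
--         bonus += 2
--     var = 0
--
--     for i in range(len(AmeriqueN)):
--         if AmeriqueN[i] in Joueur:
--             var += 1
--     if var == len(AmeriqueN):
--         bonus += 5
--     var = 0
--
--     for i in range(len(Europe)):
--         if Europe[i] in Joueur:
--             var += 1
--     if var == len(Europe):
--         bonus += 5
--     var = 0
--
--     for i in range(len(Asie)):
--         if Asie[i] in Joueur:
--             var += 1
--     if var == len(Asie):
--         bonus += 7
--     var = 0
--
--     for i in range(len(Oceanie)):
--         if Oceanie[i] in Joueur: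
--             var += 1
--     if var == len(Oceanie):
--         bonus += 2
--     var = 0
--
--     for i in range(len(Afrique)):
--         if Afrique[i] in Joueur:
--             var += 1
--     if var == len(Afrique):
--         bonus += 3
--     var = 0
--
--     return bonus
-- ===== SOURCE B (Python) =====
-- def bonus_continent(Joueur):
--     """
--         Fonction qui prend un joueur(Tableau) comme argument et qui renvoy quel est son bonus continent
--     """
--     table = [
--         ([0, 1, 2, 3, 4, 5, 6, 7, 8], 5),                       # Amerique du Nord
--         ([9, 10, 11, 12], 2),                                   # Amerique du Sud
--         ([13, 14, 15, 16, 17, 18], 3),                          # Afrique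
--         ([19, 21, 22, 23, 24, 25, 28], 5),                      # Europe
--         ([20, 26, 27, 29, 30, 31, 32, 33, 34, 37, 38, 41], 7),  # Asie
--         ([35, 36, 39, 40], 2),                                  # Oceanie
--     ]
--     # country id -> continent index
--     continent_of = {}
--     for j, (countries, _) in enumerate(table):
--         for c in countries:
--             continent_of[c] = j
--     # one pass over the player's distinct holdings, counting per continent
--     counts = {}
--     for c in set(Joueur):
--         j = continent_of.get(c)
--         if j is not None:
--             counts[j] = counts.get(j, 0) + 1
--     # award a continent's bonus when every one of its countries was counted
--     total = 0
--     for j, (countries, b) in enumerate(table):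
--         if counts.get(j, 0) == len(countries):
--             total += b
--     return total
-- ===== Notes on version B (the rewrite author's own statement) =====
-- stated objective: faster
-- what changed: Instead of six separate continent scans counting members in Joueur, B builds a country->continent-index dict once, makes ONE pass over set(Joueur) incrementing a per-continent counts dict, then awards each bonus where the count equals the continent's size.
import Mathlib
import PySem

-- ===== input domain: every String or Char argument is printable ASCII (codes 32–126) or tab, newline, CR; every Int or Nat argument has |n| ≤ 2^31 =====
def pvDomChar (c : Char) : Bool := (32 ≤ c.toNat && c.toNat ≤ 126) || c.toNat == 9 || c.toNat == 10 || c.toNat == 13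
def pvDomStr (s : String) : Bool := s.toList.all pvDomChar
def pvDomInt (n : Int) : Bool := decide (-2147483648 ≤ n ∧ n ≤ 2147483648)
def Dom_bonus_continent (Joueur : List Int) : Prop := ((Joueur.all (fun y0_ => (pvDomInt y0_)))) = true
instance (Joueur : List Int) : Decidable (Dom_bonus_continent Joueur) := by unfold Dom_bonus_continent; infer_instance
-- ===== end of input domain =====

-- B replaces A's six per-continent membership scans by a country->continent dict and ONE pass over the player's distinct holdings counting per continent; same result, alternative algorithm.


-- ===== PORT A =====
-- one Python counting loop 'for i in range(len(L)): if L[i] in Joueur: var += 1'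
def pvCountLoop (Joueur L : List Int) (var : Int) : Int :=
  (PySem.List.pyRange 0 (L.length : Int) 1).foldl
    (fun v i => if PySem.List.pyGetD L i 0 ∈ Joueur then v + 1 else v) var

def bonus_continent (Joueur : List Int) : Int :=
  let bonus : Int := 0
  let AmeriqueN : List Int := [0,1,2,3,4,5,6,7,8]
  let AmeriqueS : List Int := [9,10,11,12]
  let Afrique   : List Int := [13,14,15,16,17,18]
  let Europe    : List Int := [19,21,22,23,24,25,28]
  let Asie      : List Int := [20,26,27,29,30,31,32,33,34,37,38,41]
  let Oceanie   : List Int := [35,36,39,40]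
  let var : Int := 0
  let var := pvCountLoop Joueur AmeriqueS var
  let bonus := if var = (AmeriqueS.length : Int) then bonus + 2 else bonus
  let var : Int := 0
  let var := pvCountLoop Joueur AmeriqueN var
  let bonus := if var = (AmeriqueN.length : Int) then bonus + 5 else bonus
  let var : Int := 0
  let var := pvCountLoop Joueur Europe var
  let bonus := if var = (Europe.length : Int) then bonus + 5 else bonus
  let var : Int := 0
  let var := pvCountLoop Joueur Asie var
  let bonus := if var = (Asie.length : Int) then bonus + 7 else bonus
  let var : Int := 0
  let var := pvCountLoop Joueur Oceanie var
  let bonus := if var = (Oceanie.length : Int) then bonus + 2 else bonus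
  let var : Int := 0
  let var := pvCountLoop Joueur Afrique var
  let bonus := if var = (Afrique.length : Int) then bonus + 3 else bonus
  bonus

-- ===== PORT B =====
def pvTable : List (List Int × Int) :=
  [([0,1,2,3,4,5,6,7,8], 5),
   ([9,10,11,12], 2),
   ([13,14,15,16,17,18], 3),
   ([19,21,22,23,24,25,28], 5),
   ([20,26,27,29,30,31,32,33,34,37,38,41], 7),
   ([35,36,39,40], 2)]

-- 'continent_of = {}; for j, (countries, _) in enumerate(table): for c in countries: continent_of[c] = j'
def pvContinentOf : PySem.Dict Int Int :=
  (PySem.List.enumerate pvTable 0).foldl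
    (fun d p => p.2.1.foldl (fun d c => d.insert c p.1) d) PySem.Dict.empty

-- loop body of 'for c in set(Joueur): j = continent_of.get(c); if j is not None: counts[j] = counts.get(j, 0) + 1'
def pvStep (d : PySem.Dict Int Int) (c : Int) : PySem.Dict Int Int :=
  match pvContinentOf.get? c with
  | some j => d.insert j (d.getD j 0 + 1)
  | none => d

def bonus_continent_alt (Joueur : List Int) : Int :=
  let counts : PySem.Dict Int Int :=
    (PySem.Set.ofList Joueur).foldl pvStep PySem.Dict.empty
  (PySem.List.enumerate pvTable 0).foldl
    (fun total p => if counts.getD p.1 0 = (p.2.1.length : Int) then total + p.2.2 else total) 0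

-- ===== PRECONDITION & SPEC =====
def Spec_bonus_continent (Joueur : List Int) (out : Int) : Prop := out = bonus_continent_alt Joueur
instance (Joueur : List Int) (out : Int) : Decidable (Spec_bonus_continent Joueur out) := by unfold Spec_bonus_continent; infer_instance

-- ===== CLAIM (what is proved, stated in full; the proofs are below) =====
def Claim_equal_bonus_continent : Prop := ∀ (Joueur : List Int), Dom_bonus_continent Joueur → Spec_bonus_continent Joueur (bonus_continent Joueur)

-- ===== LEMMAS AND PROOFS =====

-- A's counting loop counts the continent's members owned by the player.
theorem pvCountLoop_eq (Joueur L : List Int) :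
    pvCountLoop Joueur L 0 = (L.countP (fun c => decide (c ∈ Joueur)) : Int) := by
  unfold pvCountLoop
  rw [PySem.List.foldl_pyRange_zero_pyGetD' L 0
        (fun v c => if c ∈ Joueur then v + 1 else v) 0]
  rw [PySem.List.foldl_ite_add_one]
  omega

-- the lookup dict, spelled out: country id -> continent index
set_option maxHeartbeats 2000000 in
set_option maxRecDepth 40000 in
theorem pvContinentOf_get? (c : Int) :
    pvContinentOf.get? c =
      (if c ∈ ([0,1,2,3,4,5,6,7,8] : List Int) then some 0
       else if c ∈ ([9,10,11,12] : List Int) then some 1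
       else if c ∈ ([13,14,15,16,17,18] : List Int) then some 2
       else if c ∈ ([19,21,22,23,24,25,28] : List Int) then some 3
       else if c ∈ ([20,26,27,29,30,31,32,33,34,37,38,41] : List Int) then some 4
       else if c ∈ ([35,36,39,40] : List Int) then some 5
       else none) := by
  by_cases h : 0 ≤ c ∧ c ≤ 41
  · obtain ⟨h1, h2⟩ := h
    interval_cases c <;> decide
  · have hn : pvContinentOf.get? c = none := by
      rw [PySem.Dict.get?_eq_none_iff_not_mem_keys]
      have hk : pvContinentOf.keys =
          [0,1,2,3,4,5,6,7,8,9,10,11,12,13,14,15,16,17,18,19,21,22,23,24,25,28,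
           20,26,27,29,30,31,32,33,34,37,38,41,35,36,39,40] := by decide
      rw [hk]; push_neg at h; simp only [List.mem_cons, List.not_mem_nil, or_false]; omega
    rw [hn]
    push_neg at h
    simp only [List.mem_cons, List.not_mem_nil, or_false]
    split_ifs <;> first | rfl | omega

-- B's per-continent counter counts the player's distinct countries mapped to that continent.
theorem pvCounts_getD (S : List Int) (d : PySem.Dict Int Int) (j : Int) :
    (S.foldl pvStep d).getD j 0 =
      d.getD j 0 + (S.countP (fun c => pvContinentOf.get? c == some j) : Int) := by
  induction S generalizing d with
  | nil => simp
  | cons c S ih =>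
    simp only [List.foldl_cons, List.countP_cons, ih]
    unfold pvStep
    rcases h : pvContinentOf.get? c with _ | j'
    · simp
    · by_cases hj : j = j'
      · subst hj; simp [PySem.Dict.getD_insert_self]; ring
      · rw [PySem.Dict.getD_insert]; simp [hj]; omega

-- two duplicate-free lists have the same number of common elements either way round
theorem pvCountP_swap (l1 l2 : List Int) (h1 : l1.Nodup) (h2 : l2.Nodup) :
    l1.countP (fun c => decide (c ∈ l2)) = l2.countP (fun c => decide (c ∈ l1)) := by
  rw [List.countP_eq_length_filter, List.countP_eq_length_filter]
  refine List.Perm.length_eq ?_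
  rw [List.perm_ext_iff_of_nodup (h1.filter _) (h2.filter _)]
  intro a; simp [and_comm]

-- for each continent, B's counter value equals A's count of owned members
theorem pvCounts_eq (Joueur L : List Int) (j : Int) (hL : L.Nodup)
    (h : ∀ c : Int, pvContinentOf.get? c = some j ↔ c ∈ L) :
    ((PySem.Set.ofList Joueur).foldl pvStep PySem.Dict.empty).getD j 0 =
      (L.countP (fun c => decide (c ∈ Joueur)) : Int) := by
  rw [pvCounts_getD, PySem.Dict.getD_empty]
  have e1 : (PySem.Set.ofList Joueur).countP (fun c => pvContinentOf.get? c == some j)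
      = (PySem.Set.ofList Joueur).countP (fun c => decide (c ∈ L)) :=
    List.countP_congr (fun c _ => by simp [← h c])
  have e2 : L.countP (fun c => decide (c ∈ PySem.Set.ofList Joueur))
      = L.countP (fun c => decide (c ∈ Joueur)) :=
    List.countP_congr (fun c _ => by simp [PySem.Set.mem_ofList])
  rw [e1, pvCountP_swap _ L (PySem.Set.nodup_ofList Joueur) hL, e2]
  omega

-- ===== VERDICT (by name: the statement is the Claim_ definition above) =====
set_option maxHeartbeats 1000000 in
theorem bonus_continent_spec : Claim_equal_bonus_continent := by
  intro Joueur _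
  show bonus_continent Joueur = bonus_continent_alt Joueur
  have g0 := pvCounts_eq Joueur [0,1,2,3,4,5,6,7,8] 0 (by decide)
    (fun c => by rw [pvContinentOf_get?]; split_ifs <;> simp_all <;> omega)
  have g1 := pvCounts_eq Joueur [9,10,11,12] 1 (by decide)
    (fun c => by rw [pvContinentOf_get?]; split_ifs <;> simp_all <;> omega)
  have g2 := pvCounts_eq Joueur [13,14,15,16,17,18] 2 (by decide)
    (fun c => by rw [pvContinentOf_get?]; split_ifs <;> simp_all <;> omega)
  have g3 := pvCounts_eq Joueur [19,21,22,23,24,25,28] 3 (by decide)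
    (fun c => by rw [pvContinentOf_get?]; split_ifs <;> simp_all <;> omega)
  have g4 := pvCounts_eq Joueur [20,26,27,29,30,31,32,33,34,37,38,41] 4 (by decide)
    (fun c => by rw [pvContinentOf_get?]; split_ifs <;> simp_all <;> omega)
  have g5 := pvCounts_eq Joueur [35,36,39,40] 5 (by decide)
    (fun c => by rw [pvContinentOf_get?]; split_ifs <;> simp_all <;> omega)
  unfold bonus_continent bonus_continent_alt pvTable
  simp only [PySem.List.enumerate_cons, PySem.List.enumerate_nil, List.foldl_cons,
    List.foldl_nil, pvCountLoop_eq]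
  norm_num [g0, g1, g2, g3, g4, g5]
  split_ifs <;> omega
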